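-- pv_equiv track=rewrite | github.com/archfan7411/aoc2024 | day7/day7_2.py | count_validities
-- ===== SOURCE A (Python) =====
-- def count_validities(result, numbers, interim, index=0):
--     count = 0
--     if interim > result:
--         return 0
--     if index == len(numbers)-1:
--         if interim == result:
--             return interim
--         return 0
--     count += count_validities(result, numbers, interim+numbers[index+1], index+1)
--     count += count_validities(result, numbers, interim*numbers[index+1], index+1)
--     concatenation = int(str(interim)+str(numbers[index+1]))
--     count += count_validities(result, numbers, concatenation, index+1)
--     return count
-- ===== SOURCE B (Python) =====
-- def count_validities(result, numbers, interim, index=0):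
--     # Iterative level-order evaluation: keep the frontier of interim values
--     # (with multiplicity), pruning values above result, then score the last level.
--     frontier = [interim]
--     for num in numbers[index+1:]:
--         frontier = [w for v in frontier if v <= result
--                       for w in (v + num, v * num, int(str(v) + str(num)))]
--     return frontier.count(result) * result
-- ===== Notes on version B (the rewrite author's own statement) =====
-- stated objective: alternative
-- what changed: Replaces the 3-way recursion with an iterative level-order sweep: a frontier list of reachable interim values (with multiplicity) is advanced once per remaining number and pruned at values above result, and the final score is frontier.count(result)*result.
-- outside the precondition, e.g. on count_validities(10, [1, 20, -5], 5, 0): A returns 0, B returns 0; on count_validities(39, [8, 1], 2, -2): A returns 39, B returns 0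
import Mathlib
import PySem

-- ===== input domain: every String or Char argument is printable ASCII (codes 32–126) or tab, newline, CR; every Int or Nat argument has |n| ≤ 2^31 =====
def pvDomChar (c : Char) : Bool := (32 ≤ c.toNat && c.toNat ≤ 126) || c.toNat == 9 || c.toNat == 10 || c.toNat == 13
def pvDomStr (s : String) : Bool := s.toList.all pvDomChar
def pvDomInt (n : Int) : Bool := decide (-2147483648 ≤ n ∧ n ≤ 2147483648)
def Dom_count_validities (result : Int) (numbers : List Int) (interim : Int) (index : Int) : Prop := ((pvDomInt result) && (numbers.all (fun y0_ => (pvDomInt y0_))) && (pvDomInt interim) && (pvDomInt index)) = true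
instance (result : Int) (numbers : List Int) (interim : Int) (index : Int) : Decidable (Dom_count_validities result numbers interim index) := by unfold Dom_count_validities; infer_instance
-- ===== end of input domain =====

-- B replaces A's 3-way recursion by an iterative level-order sweep over a frontier
-- list of interim values (objective: alternative decomposition; return value only, no mutation).

-- ===== PORT A =====
def count_validities (result : Int) (numbers : List Int) (interim : Int) (index : Int) : Int :=
  if interim > result then 0
  else if index = (numbers.length : Int) - 1 then
    if interim = result then interim else 0
  else
    match h : PySem.List.pyGet? numbers (index + 1) with
    | none => 0       -- Python raises IndexError here (excluded by Pre_)
    | some num =>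
        count_validities result numbers (interim + num) (index + 1)
        + count_validities result numbers (interim * num) (index + 1)
        + (match PySem.Int.ofChars? (PySem.Int.toChars interim ++ PySem.Int.toChars num) with
           | some c => count_validities result numbers c (index + 1)   -- int(str(interim)+str(num))
           | none => 0)   -- Python raises ValueError here (excluded by Pre_)
termination_by ((numbers.length : Int) - index).toNat
decreasing_by
  all_goals
    have hr : PySem.Raise.InRange numbers.length (index + 1) := by
      by_contra hc
      rw [← PySem.List.pyGet?_eq_none_iff (xs := numbers)] at hc
      simp [hc] at h
    unfold PySem.Raise.InRange at hr
    omega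

-- ===== PORT B =====
-- the three children of a frontier value v under the next number num
def cvChildren (v : Int) (num : Int) : List Int :=
  match PySem.Int.ofChars? (PySem.Int.toChars v ++ PySem.Int.toChars num) with
  | some w => [v + num, v * num, w]      -- (v + num, v * num, int(str(v)+str(num)))
  | none => [v + num, v * num]           -- Python raises ValueError here (excluded by Pre_)

def count_validities_alt (result : Int) (numbers : List Int) (interim : Int) (index : Int) : Int :=
  let frontier :=
    (PySem.List.slice numbers (some (index + 1)) none).foldl
      (fun fr num => fr.flatMap (fun v => if v ≤ result then cvChildren v num else []))
      [interim]
  ((frontier.count result : Nat) : Int) * result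

-- ===== PRECONDITION & SPEC =====
-- Pre_ excludes (a) indices outside [0, len(numbers)) when interim ≤ result — A there wraps
-- negative indices around / raises IndexError, outside the natural domain — and (b) negative
-- elements in the reachable tail numbers[index+1:] when interim ≤ result, on which A's digit
-- concatenation int(str+str) can raise ValueError (it may still return if pruning stops first);
-- when interim > result A returns 0 immediately, which B matches for every index.
def Pre_count_validities (result : Int) (numbers : List Int) (interim : Int) (index : Int) : Prop :=
  result < interim ∨
    (0 ≤ index ∧ index < (numbers.length : Int) ∧
      ∀ x ∈ numbers.drop (index + 1).toNat, 0 ≤ x)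
instance (result : Int) (numbers : List Int) (interim : Int) (index : Int) : Decidable (Pre_count_validities result numbers interim index) := by unfold Pre_count_validities; infer_instance

def pvWitness_count_validities : Int × List Int × Int × Int := (24, [2, 3, 4], 2, 0)

def Spec_count_validities (result : Int) (numbers : List Int) (interim : Int) (index : Int) (out : Int) : Prop := out = count_validities_alt result numbers interim index
instance (result : Int) (numbers : List Int) (interim : Int) (index : Int) (out : Int) : Decidable (Spec_count_validities result numbers interim index out) := by unfold Spec_count_validities; infer_instance

-- ===== CLAIM =====
def Claim_equal_count_validities : Prop := ∀ (result : Int) (numbers : List Int) (interim : Int) (index : Int), Dom_count_validities result numbers interim index → Pre_count_validities result numbers interim index → Spec_count_validities result numbers interim index (count_validities result numbers interim index)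

-- ===== LEMMAS AND PROOFS =====

-- A's recursion, re-expressed over the list of numbers that remain after the current index
def cvG (result : Int) : List Int → Int → Int
  | [], v => if v = result then result else 0
  | num :: rest, v =>
      if result < v then 0
      else
        cvG result rest (v + num) + cvG result rest (v * num) +
          (match PySem.Int.ofChars? (PySem.Int.toChars v ++ PySem.Int.toChars num) with
           | some c => cvG result rest c
           | none => 0)

lemma cvG_of_gt (result : Int) (rest : List Int) (v : Int) (h : result < v) :
    cvG result rest v = 0 := by
  cases rest with
  | nil => simp [cvG]; omega
  | cons a t => simp [cvG, h]

-- scoring the last level is counting result-hits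
lemma cvCountScore (result : Int) (fr : List Int) :
    (fr.map (cvG result [])).sum = ((fr.count result : Nat) : Int) * result := by
  induction fr with
  | nil => simp
  | cons a t ih =>
      have ih' : (List.map (fun x => if x = result then result else 0) t).sum
          = ((t.count result : Nat) : Int) * result := by
        rw [← ih]; rfl
      simp only [List.map_cons, List.sum_cons, List.count_cons, cvG, ih']
      by_cases h : a = result
      · simp [h]; ring
      · simp [h]

-- pushing a sum through flatMap (no Mathlib lemma in this form)
lemma cvSumFlat (f : Int → Int) (g : Int → List Int) (l : List Int) :
    ((l.flatMap g).map f).sum = (l.map (fun v => ((g v).map f).sum)).sum := by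
  induction l with
  | nil => simp
  | cons a t ih => simp [ih]

-- one child list sums to one cvG step
lemma cvChildrenSum (result : Int) (rest : List Int) (num v : Int) :
    ((if v ≤ result then cvChildren v num else []).map (cvG result rest)).sum
      = cvG result (num :: rest) v := by
  by_cases h : v ≤ result
  · simp only [h, if_true, cvChildren, cvG]
    have h' : ¬ result < v := by omega
    cases hm : PySem.Int.ofChars? (PySem.Int.toChars v ++ PySem.Int.toChars num) with
    | none => simp [h']
    | some w => simp [h']; ring
  · have h' : result < v := by omega
    simp [h, cvG, h']

-- loop invariant of B's fold: total score is the cvG-sum over the frontier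
lemma cvFoldSum (result : Int) (rest : List Int) : ∀ fr : List Int,
    (((rest.foldl
        (fun fr num => fr.flatMap (fun v => if v ≤ result then cvChildren v num else []))
        fr).count result : Nat) : Int) * result
      = (fr.map (cvG result rest)).sum := by
  induction rest with
  | nil => intro fr; simp only [List.foldl_nil]; exact (cvCountScore result fr).symm
  | cons num rest ih =>
      intro fr
      rw [List.foldl_cons, ih, cvSumFlat]
      exact congrArg List.sum
        (List.map_congr_left (fun v _ => cvChildrenSum result rest num v))

-- A equals cvG on the dropped tail, for in-range indices
lemma cvA_eq_g (result : Int) (numbers : List Int) :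
    ∀ (d i : Nat) (v : Int), i < numbers.length → numbers.length - 1 - i = d →
      count_validities result numbers v (i : Int) = cvG result (numbers.drop (i + 1)) v := by
  intro d
  induction d with
  | zero =>
      intro i v hi hd
      have hlast : i = numbers.length - 1 := by omega
      have hidx : (i : Int) = (numbers.length : Int) - 1 := by omega
      have hdrop : numbers.drop (i + 1) = [] := by
        apply List.drop_eq_nil_of_le; omega
      rw [count_validities, hdrop]
      by_cases hv : v > result
      · rw [if_pos hv]
        simp only [cvG]
        rw [if_neg (by omega : ¬ v = result)]
      · rw [if_neg hv, if_pos hidx]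
        simp only [cvG]
        by_cases hveq : v = result
        · simp [hveq]
        · simp [hveq]
  | succ d ih =>
      intro i v hi hd
      rw [count_validities]
      have hne : ¬ ((i : Int) = (numbers.length : Int) - 1) := by omega
      have hi1 : i + 1 < numbers.length := by omega
      have hget : PySem.List.pyGet? numbers ((i : Int) + 1) = some numbers[i + 1] := by
        have : ((i : Int) + 1) = ((i + 1 : Nat) : Int) := by push_cast; ring
        rw [this, PySem.List.pyGet?_natCast, List.getElem?_eq_getElem hi1]
      have hdrop : numbers.drop (i + 1) = numbers[i + 1] :: numbers.drop (i + 2) := by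
        rw [List.drop_eq_getElem_cons hi1]
      have hcast : (i : Int) + 1 = ((i + 1 : Nat) : Int) := by push_cast; ring
      rw [hdrop]
      by_cases hv : result < v
      · simp [cvG, hv]
      · have hv' : ¬ v > result := hv
        simp only [hv', if_false, hne, if_false]
        rw [hget]
        simp only [cvG, hv, if_false]
        have ih1 := ih (i + 1) (v + numbers[i + 1]) hi1 (by omega)
        have ih2 := ih (i + 1) (v * numbers[i + 1]) hi1 (by omega)
        rw [hcast, ih1, ih2]
        congr 1
        cases hm : PySem.Int.ofChars? (PySem.Int.toChars v ++ PySem.Int.toChars numbers[i + 1]) with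
        | none => rfl
        | some c => exact ih (i + 1) c hi1 (by omega)

-- ===== VERDICT =====
theorem count_validities_spec : Claim_equal_count_validities := by
  intro result numbers interim index _hdom hpre
  unfold Spec_count_validities
  unfold count_validities_alt
  by_cases hgt : result < interim
  · -- A prunes immediately; B's frontier is pruned in the first step (or scores 0)
    rw [count_validities]
    simp only [show interim > result from hgt, if_true]
    rw [cvFoldSum]
    simp [cvG_of_gt result _ interim hgt]
  · rcases hpre with h | ⟨h0, hlen, _⟩
    · omega
    · rw [cvFoldSum]
      have hidx : index = ((index.toNat : Nat) : Int) := by omega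
      have hi : index.toNat < numbers.length := by omega
      have hslice : PySem.List.slice numbers (some (index + 1)) none
          = numbers.drop (index + 1).toNat :=
        PySem.List.slice_from numbers (by omega)
      rw [hslice]
      have : (index + 1).toNat = index.toNat + 1 := by omega
      rw [this]
      simp only [List.map_cons, List.map_nil, List.sum_cons, List.sum_nil, add_zero]
      rw [hidx]
      exact cvA_eq_g result numbers (numbers.length - 1 - index.toNat) index.toNat interim hi rfl
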